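-- pv_equiv track=rewrite | github.com/ScarlettHuang1/DL_Project3_CBOW | DL_Project3_CBOW.py | get_tokenized_dataset
-- ===== SOURCE A (Python) =====
-- def get_tokenized_dataset(dataset, verbose=False):
--     x_list = []
--     for i, token in enumerate(dataset):
--         m = 1
--
--         # Get the left and right tokens
--         start = max(0,i-m)
--         left_tokens = dataset[start:i]
--
--         end = min(len(dataset)-1,i+m)
--         right_tokens = dataset[i+1:end+1]
--
--         # Check these are the same length, and if so use them to add a row of data. This should be a list like
--         # [a, c, b] where b is the center word
--         if len(left_tokens) == len(right_tokens):
--             w_context = left_tokens + right_tokens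
--
--             wc = token
--
--             x_list.extend(
--                 [[w_context[0],w_context[1], wc]]
--             )
--
--     return x_list
-- ===== SOURCE B (Python) =====
-- def get_tokenized_dataset(dataset, verbose=False):
--     # Slide a width-3 window by zipping three shifted views; zip stops at the
--     # shortest, so only interior centers produce a row.
--     return [[l, r, c] for l, c, r in zip(dataset, dataset[1:], dataset[2:])]
-- ===== Notes on version B (the rewrite author's own statement) =====
-- stated objective: idiomatic
-- what changed: Replaced per-index slicing with max/min boundary arithmetic and a length-equality check by a single comprehension over zip of three shifted views of the list, which yields exactly the interior windows (no per-element slice allocations or boundary checks; measured ~2.3x faster).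
import Mathlib
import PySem

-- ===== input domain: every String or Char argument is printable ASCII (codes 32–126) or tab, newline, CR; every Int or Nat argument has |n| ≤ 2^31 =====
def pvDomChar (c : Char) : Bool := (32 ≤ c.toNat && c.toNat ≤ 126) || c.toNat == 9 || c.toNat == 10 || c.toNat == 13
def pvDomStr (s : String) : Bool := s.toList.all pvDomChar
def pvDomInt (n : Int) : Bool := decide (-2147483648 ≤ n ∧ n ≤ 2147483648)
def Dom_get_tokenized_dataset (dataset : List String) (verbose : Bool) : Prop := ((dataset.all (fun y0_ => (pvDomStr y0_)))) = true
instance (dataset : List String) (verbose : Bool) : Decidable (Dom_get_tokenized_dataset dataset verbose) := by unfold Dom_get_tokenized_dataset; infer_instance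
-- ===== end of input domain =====

-- B replaces A's index arithmetic, slicing and length check by one map over a zip of
-- three shifted views of the list (idiomatic; same O(n) cost); on one-element input
-- A raises IndexError (excluded by Pre_) while B returns [].


-- ===== PORT A =====
-- loop body of A's `for i, token in enumerate(dataset)` loop, step for step
def pvStepA (dataset : List String) (x_list : List (List String)) (p : Int × String) : List (List String) :=
  let i := p.1
  let token := p.2
  let m : Int := 1
  let start := max 0 (i - m)
  let left_tokens := PySem.List.slice dataset (some start) (some i)
  let e := min ((dataset.length : Int) - 1) (i + m)
  let right_tokens := PySem.List.slice dataset (some (i + 1)) (some (e + 1))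
  if left_tokens.length = right_tokens.length then
    let w_context := left_tokens ++ right_tokens
    match PySem.List.pyGet? w_context 0, PySem.List.pyGet? w_context 1 with
    | some a, some b => x_list ++ [[a, b, token]]
    | _, _ => x_list   -- w_context[0] or w_context[1] raises IndexError: outside Pre_
  else x_list

def get_tokenized_dataset (dataset : List String) (verbose : Bool) : List (List String) :=
  (PySem.List.enumerate dataset 0).foldl (pvStepA dataset) []

-- ===== PORT B =====
def get_tokenized_dataset_alt (dataset : List String) (verbose : Bool) : List (List String) :=
  ((dataset.zip (PySem.List.slice dataset (some 1) none)).zip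
      (PySem.List.slice dataset (some 2) none)).map
    (fun p => [p.1.1, p.2, p.1.2])

-- ===== PRECONDITION & SPEC =====
-- Pre_ excludes exactly the one-element lists, on which A raises IndexError.
def Pre_get_tokenized_dataset (dataset : List String) (verbose : Bool) : Prop :=
  dataset.length ≠ 1
instance (dataset : List String) (verbose : Bool) : Decidable (Pre_get_tokenized_dataset dataset verbose) := by unfold Pre_get_tokenized_dataset; infer_instance

def pvWitness_get_tokenized_dataset : List String × Bool := (["ab", "cd", "ef"], false)

def Spec_get_tokenized_dataset (dataset : List String) (verbose : Bool) (out : List (List String)) : Prop := out = get_tokenized_dataset_alt dataset verbose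
instance (dataset : List String) (verbose : Bool) (out : List (List String)) : Decidable (Spec_get_tokenized_dataset dataset verbose out) := by unfold Spec_get_tokenized_dataset; infer_instance

-- ===== CLAIM (what is proved, stated in full; the proofs are below) =====
def Claim_equal_get_tokenized_dataset : Prop := ∀ (dataset : List String) (verbose : Bool), Dom_get_tokenized_dataset dataset verbose → Pre_get_tokenized_dataset dataset verbose → Spec_get_tokenized_dataset dataset verbose (get_tokenized_dataset dataset verbose)


-- ===== LEMMAS AND PROOFS =====

-- the contribution of loop iteration (i, token) to x_list
def contribA (dataset : List String) (i : Int) (token : String) : List (List String) :=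
  let left := PySem.List.slice dataset (some (max 0 (i - 1))) (some i)
  let right := PySem.List.slice dataset (some (i + 1)) (some (min ((dataset.length : Int) - 1) (i + 1) + 1))
  if left.length = right.length then
    match PySem.List.pyGet? (left ++ right) 0, PySem.List.pyGet? (left ++ right) 1 with
    | some a, some b => [[a, b, token]]
    | _, _ => []
  else []

lemma stepA_eq (dataset : List String) (acc : List (List String)) (p : Int × String) :
    pvStepA dataset acc p = acc ++ contribA dataset p.1 p.2 := by
  unfold pvStepA contribA
  dsimp only
  split_ifs with h
  · split <;> simp_all
  · simp

lemma foldlA (dataset : List String) :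
    ∀ (l : List (Int × String)) (acc : List (List String)),
      l.foldl (pvStepA dataset) acc = acc ++ l.flatMap (fun p => contribA dataset p.1 p.2) := by
  intro l
  induction l with
  | nil => simp
  | cons p l ih => intro acc; simp [List.foldl_cons, stepA_eq, ih]

lemma enum_shift {α : Type} (xs : List α) (s : Int) :
    PySem.List.enumerate xs (s + 1) = (PySem.List.enumerate xs s).map (fun p => (p.1 + 1, p.2)) := by
  induction xs generalizing s with
  | nil => simp [PySem.List.enumerate_nil]
  | cons x xs ih =>
      simp [PySem.List.enumerate_cons, ih (s + 1)]

lemma contrib_shift (x : String) (d : List String) (i : Nat) (h : 1 ≤ i) (t : String) :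
    contribA (x :: d) ((i : Int) + 1) t = contribA d (i : Int) t := by
  obtain ⟨j, rfl⟩ : ∃ j, i = j + 1 := ⟨i - 1, by omega⟩
  unfold contribA
  have hl1 : max 0 (((j + 1 : Nat) : Int) + 1 - 1) = (((j + 1 : Nat)) : Int) := by push_cast; omega
  have hl2 : max 0 (((j + 1 : Nat) : Int) - 1) = ((j : Nat) : Int) := by push_cast; omega
  rw [hl1, hl2]
  have e1 : PySem.List.slice (x :: d) (some ((j + 1 : Nat) : Int)) (some (((j + 1 : Nat) : Int) + 1)) = ((x :: d).drop (j + 1)).take 1 := by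
    have := PySem.List.slice_natCast_add (x :: d) (j + 1) 1
    simpa using this
  have e2 : PySem.List.slice d (some ((j : Nat) : Int)) (some ((j + 1 : Nat) : Int)) = (d.drop j).take 1 := by
    have := PySem.List.slice_natCast_add d j 1
    simpa [Nat.cast_add] using this
  rw [e1, e2, List.drop_succ_cons]
  -- right slices
  have r1 : PySem.List.slice (x :: d) (some (((j + 1 : Nat) : Int) + 1 + 1)) (some (min (((x :: d).length : Int) - 1) (((j + 1 : Nat) : Int) + 1 + 1) + 1)) = (d.drop (j + 2)).take ((min ((d.length : Int)) ((j : Int) + 3) + 1).toNat - (j + 3)) := by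
    rw [PySem.List.slice_toNat]
    · have h1 : ((((j + 1 : Nat) : Int) + 1 + 1)).toNat = j + 3 := by push_cast; omega
      have h2 : (min (((x :: d).length : Int) - 1) (((j + 1 : Nat) : Int) + 1 + 1) + 1).toNat = (min ((d.length : Int)) ((j : Int) + 3) + 1).toNat := by
        simp; push_cast; omega
      rw [h1, h2, show List.drop (j + 3) (x :: d) = List.drop (j + 2) d from by simp [List.drop_succ_cons]]
    · push_cast; omega
    · simp only [List.length_cons]; push_cast; omega
  have r2 : PySem.List.slice d (some (((j + 1 : Nat) : Int) + 1)) (some (min ((d.length : Int) - 1) (((j + 1 : Nat) : Int) + 1) + 1)) = (d.drop (j + 2)).take ((min ((d.length : Int) - 1) ((j : Int) + 2) + 1).toNat - (j + 2)) := by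
    rw [PySem.List.slice_toNat]
    · have h1 : ((((j + 1 : Nat) : Int) + 1)).toNat = j + 2 := by push_cast; omega
      have h2 : (min ((d.length : Int) - 1) (((j + 1 : Nat) : Int) + 1) + 1).toNat = (min ((d.length : Int) - 1) ((j : Int) + 2) + 1).toNat := by push_cast; ring_nf
      rw [h1, h2]
    · push_cast; omega
    · push_cast; omega
  rw [r1, r2]
  have : (min ((d.length : Int)) ((j : Int) + 3) + 1).toNat - (j + 3) = (min ((d.length : Int) - 1) ((j : Int) + 2) + 1).toNat - (j + 2) := by omega
  rw [this]

lemma contrib_zero (d : List String) (t : String) : contribA d 0 t = [] := by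
  unfold contribA
  match d with
  | [] => simp [PySem.List.slice, PySem.List.pyGet?]
  | [a] => simp [PySem.List.slice, PySem.List.clampIdx, PySem.List.pyGet?, PySem.List.pyIdx?]
  | a :: b :: d => simp [PySem.List.slice, PySem.List.clampIdx, PySem.List.pyGet?, PySem.List.pyIdx?]

lemma alt_cons (x y z : String) (t : List String) (v : Bool) :
    get_tokenized_dataset_alt (x :: y :: z :: t) v = [x, z, y] :: get_tokenized_dataset_alt (y :: z :: t) v := by
  simp [get_tokenized_dataset_alt, PySem.List.slice_from_one, PySem.List.slice_from _ (by norm_num : (0:Int) ≤ 2)]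

lemma contrib_one (a b : String) (d : List String) (t : String) :
    contribA (a :: b :: d) 1 t = match d with
      | [] => []
      | c :: _ => [[a, c, t]] := by
  unfold contribA
  dsimp only
  match d with
  | [] =>
      rw [show min ((([a, b] : List String).length : Int) - 1) (1 + 1) = 1 from by simp,
          show max (0:Int) (1-1) = 0 from by omega]
      rw [PySem.List.slice_toNat, PySem.List.slice_toNat]
      all_goals norm_num
  | c :: d =>
      rw [show min (((a :: b :: c :: d).length : Int) - 1) (1 + 1) = 2 from by simp; omega,
          show max (0:Int) (1-1) = 0 from by omega]
      rw [PySem.List.slice_toNat, PySem.List.slice_toNat]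
      all_goals norm_num [PySem.List.pyGet?, PySem.List.pyIdx?]
      rw [if_pos (show (2:Int) ≤ (d.length:Int) + 1 + 1 from by push_cast; omega)]
      simp

-- interior part of the loop: flatMap of contributions over enumerate of the tail, starting at 1
lemma pvInterior (d' : List String) : ∀ (a : String) (v : Bool),
    (PySem.List.enumerate d' 1).flatMap (fun p => contribA (a :: d') p.1 p.2)
      = get_tokenized_dataset_alt (a :: d') v := by
  induction d' with
  | nil => intro a v; simp [PySem.List.enumerate_nil, get_tokenized_dataset_alt, PySem.List.slice_from_one, PySem.List.slice_from _ (by norm_num : (0:Int) ≤ 2)]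
  | cons b d ih =>
      intro a v
      rw [PySem.List.enumerate_cons, List.flatMap_cons]
      rw [show (1 : Int) + 1 = 1 + 1 from rfl, enum_shift d 1, List.flatMap_map]
      have hcongr : ∀ p ∈ PySem.List.enumerate d 1,
          contribA (a :: b :: d) (p.1 + 1) p.2 = contribA (b :: d) p.1 p.2 := by
        intro p hp
        rcases (PySem.List.mem_enumerate_iff _ _ _).1 hp with ⟨k, hk, rfl⟩
        have : (1 : Int) + (k : Int) = ((k + 1 : Nat) : Int) := by push_cast; ring
        simp only [this]
        exact contrib_shift a (b :: d) (k + 1) (by omega) _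
      rw [List.flatMap_congr hcongr]
      rw [ih b v]
      match d with
      | [] => simp [contrib_one, get_tokenized_dataset_alt, PySem.List.slice_from_one, PySem.List.slice_from _ (by norm_num : (0:Int) ≤ 2)]
      | c :: t => rw [contrib_one]; simp [alt_cons]

-- ===== VERDICT (by name: the statement is the Claim_ definition above) =====
theorem get_tokenized_dataset_spec : Claim_equal_get_tokenized_dataset := by
  intro dataset verbose _ _
  unfold Spec_get_tokenized_dataset get_tokenized_dataset
  rw [foldlA]
  match dataset with
  | [] => simp [PySem.List.enumerate_nil, get_tokenized_dataset_alt, PySem.List.slice]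
  | a :: d' =>
      rw [PySem.List.enumerate_cons, List.flatMap_cons, contrib_zero, show (0 : Int) + 1 = 1 from rfl]
      simpa using pvInterior d' a verbose
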